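-- pv_equiv track=rewrite | github.com/nightfuze/algorithms-and-data-structures-labs | lab_6/lab_6.py | find_optimal_combination
-- ===== SOURCE A (Python) =====
-- def find_optimal_combination(combination, optimal_combinations, vacancy_count, vacancy_role):
--     """
--     Целевая функция для нахождения оптимального решения заполнения вакантных мест.
--
--     :param combination: список вариантов заполнения вакантных мест
--     :param optimal_combinations: оптимальный список вариантов заполнения вакантных мест
--     :param vacancy_count: количество вакантных мест
--     :param vacancy_role: специальность вакантного места
--     :return: оптимальное заполнение вакантных мест
--     """
--
--     for curr_comb in combination:
--         curr_comb_sorted = sorted(curr_comb, key=lambda c: c['exp'], reverse=True)[:vacancy_count]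
--         if optimal_combinations.get(vacancy_role) is not None:
--             optimal_comb_sorted = sorted(optimal_combinations[vacancy_role], key=lambda c: c['exp'], reverse=True)[
--                                   :vacancy_count]
--             optimal_comb_sum = sum([c['exp'] for c in optimal_comb_sorted])
--             curr_comb_sum = sum([c['exp'] for c in curr_comb_sorted])
--
--             if curr_comb_sum > optimal_comb_sum:
--                 optimal_combinations[vacancy_role] = curr_comb_sorted
--         else:
--             optimal_combinations[vacancy_role] = curr_comb_sorted
--
--     return optimal_combinations
-- ===== SOURCE B (Python) =====
-- def find_optimal_combination(combination, optimal_combinations, vacancy_count, vacancy_role):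
--     def score(comb):
--         return sum(sorted((c['exp'] for c in comb), reverse=True)[:vacancy_count])
--
--     scores = [score(comb) for comb in combination]
--     if not scores:
--         return optimal_combinations
--     m = max(scores)
--     stored = optimal_combinations.get(vacancy_role)
--     if stored is not None and score(stored) >= m:
--         return optimal_combinations
--     winner = combination[scores.index(m)]
--     optimal_combinations[vacancy_role] = sorted(winner, key=lambda c: c['exp'], reverse=True)[:vacancy_count]
--     return optimal_combinations
-- ===== Notes on version B (the rewrite author's own statement) =====
-- stated objective: alternative
-- what changed: A folds over the combinations updating the dict's stored optimal in place (re-reading, re-sorting and re-summing it each iteration); B is staged: it scores every combination by sorting just the experience values, takes max() of the score list, compares it once against the stored baseline, locates the winner with list.index, and sorts and writes only that one winning combination.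
import Mathlib
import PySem

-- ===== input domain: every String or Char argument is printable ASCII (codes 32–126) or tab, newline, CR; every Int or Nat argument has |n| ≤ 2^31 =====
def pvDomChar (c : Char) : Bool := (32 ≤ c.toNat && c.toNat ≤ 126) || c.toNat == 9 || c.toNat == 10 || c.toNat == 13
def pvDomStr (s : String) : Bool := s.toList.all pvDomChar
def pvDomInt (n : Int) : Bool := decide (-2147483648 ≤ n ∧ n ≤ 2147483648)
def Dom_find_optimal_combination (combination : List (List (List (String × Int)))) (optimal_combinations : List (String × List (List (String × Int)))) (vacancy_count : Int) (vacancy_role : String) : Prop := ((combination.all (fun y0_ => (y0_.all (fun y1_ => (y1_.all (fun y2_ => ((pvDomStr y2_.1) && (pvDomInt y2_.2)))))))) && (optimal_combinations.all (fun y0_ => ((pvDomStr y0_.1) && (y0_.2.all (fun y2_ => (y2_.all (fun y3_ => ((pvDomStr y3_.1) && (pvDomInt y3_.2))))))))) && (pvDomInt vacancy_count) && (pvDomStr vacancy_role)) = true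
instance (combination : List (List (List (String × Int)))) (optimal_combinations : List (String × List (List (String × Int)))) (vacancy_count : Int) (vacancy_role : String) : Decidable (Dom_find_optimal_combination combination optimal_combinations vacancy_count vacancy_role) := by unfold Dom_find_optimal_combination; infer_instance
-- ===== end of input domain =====

-- B replaces A's fold-with-in-place-dict-updates by a staged computation: score every combination
-- (sorting only the experience values), take the max, compare it once with the stored baseline,
-- locate the first winner by index, and sort/write only that one (objective: alternative).
-- Both versions mutate the optimal_combinations dict in place in Python (to the same final state);
-- the equivalence proved here is about the returned dict.

-- c['exp'] — first-match lookup; Pre_ guarantees the key is present wherever Python reads it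
def pvExp (c : List (String × Int)) : Int := ((PySem.Dict.mk c).get? "exp").getD 0

-- ===== PORT A =====
def find_optimal_combination (combination : List (List (List (String × Int)))) (optimal_combinations : List (String × List (List (String × Int)))) (vacancy_count : Int) (vacancy_role : String) : List (String × List (List (String × Int))) :=
  (combination.foldl
    (fun (d : PySem.Dict String (List (List (String × Int)))) curr_comb =>
      let curr_comb_sorted := PySem.List.slice (PySem.List.sorted curr_comb pvExp true) none (some vacancy_count)
      match PySem.Dict.get? d vacancy_role with
      | some stored =>
        let optimal_comb_sorted := PySem.List.slice (PySem.List.sorted stored pvExp true) none (some vacancy_count)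
        let optimal_comb_sum := (optimal_comb_sorted.map pvExp).sum
        let curr_comb_sum := (curr_comb_sorted.map pvExp).sum
        if curr_comb_sum > optimal_comb_sum then d.insert vacancy_role curr_comb_sorted else d
      | none => d.insert vacancy_role curr_comb_sorted)
    (PySem.Dict.mk optimal_combinations)).items

-- ===== PORT B =====
-- score(comb) = sum(sorted((c['exp'] for c in comb), reverse=True)[:vacancy_count])
def pvValScore (vacancy_count : Int) (comb : List (List (String × Int))) : Int :=
  (PySem.List.slice (PySem.List.sorted (comb.map pvExp) (fun x => x) true) none (some vacancy_count)).sum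

-- sorted(comb, key=lambda c: c['exp'], reverse=True)[:vacancy_count]
def pvTop (vacancy_count : Int) (comb : List (List (String × Int))) : List (List (String × Int)) :=
  PySem.List.slice (PySem.List.sorted comb pvExp true) none (some vacancy_count)

def find_optimal_combination_alt (combination : List (List (List (String × Int)))) (optimal_combinations : List (String × List (List (String × Int)))) (vacancy_count : Int) (vacancy_role : String) : List (String × List (List (String × Int))) :=
  let scores := combination.map (pvValScore vacancy_count)
  let d := PySem.Dict.mk optimal_combinations
  match PySem.List.max? scores (fun x => x) with
  | none => d.items
  | some m =>
    let winner := (PySem.List.pyGet? combination (((PySem.List.index? scores m).getD 0 : Nat) : Int)).getD []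
    match PySem.Dict.get? d vacancy_role with
    | some stored =>
      if pvValScore vacancy_count stored ≥ m then d.items
      else (d.insert vacancy_role (pvTop vacancy_count winner)).items
    | none => (d.insert vacancy_role (pvTop vacancy_count winner)).items

-- ===== PRECONDITION & SPEC =====
-- Pre_ restricts vacancy_count to the natural domain of a count when the loop runs at all
-- (0 ≤ vacancy_count, or combination = [] where the count is never used; A also returns on negative
-- counts, where its repeated re-truncation of the already-truncated stored optimal is an
-- implementation accident), and excludes inputs where Python raises KeyError: a staff member without
-- an 'exp' key in some iterated combination or in the stored optimal.
def Pre_find_optimal_combination (combination : List (List (List (String × Int)))) (optimal_combinations : List (String × List (List (String × Int)))) (vacancy_count : Int) (vacancy_role : String) : Prop :=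
  combination = [] ∨
  (0 ≤ vacancy_count ∧
   (∀ comb ∈ combination, ∀ c ∈ comb, (PySem.Dict.mk c).contains "exp" = true) ∧
   (∀ v, (PySem.Dict.mk optimal_combinations).get? vacancy_role = some v →
      ∀ c ∈ v, (PySem.Dict.mk c).contains "exp" = true))
instance (combination : List (List (List (String × Int)))) (optimal_combinations : List (String × List (List (String × Int)))) (vacancy_count : Int) (vacancy_role : String) : Decidable (Pre_find_optimal_combination combination optimal_combinations vacancy_count vacancy_role) := by unfold Pre_find_optimal_combination; infer_instance

def pvWitness_find_optimal_combination : (List (List (List (String × Int)))) × (List (String × List (List (String × Int)))) × Int × String :=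
  ([[[("exp", 3)], [("exp", 5)]], [[("exp", 4)]]], [("r", [[("exp", 1)]])], 1, "r")

def Spec_find_optimal_combination (combination : List (List (List (String × Int)))) (optimal_combinations : List (String × List (List (String × Int)))) (vacancy_count : Int) (vacancy_role : String) (out : List (String × List (List (String × Int)))) : Prop := out = find_optimal_combination_alt combination optimal_combinations vacancy_count vacancy_role
instance (combination : List (List (List (String × Int)))) (optimal_combinations : List (String × List (List (String × Int)))) (vacancy_count : Int) (vacancy_role : String) (out : List (String × List (List (String × Int)))) : Decidable (Spec_find_optimal_combination combination optimal_combinations vacancy_count vacancy_role out) := by unfold Spec_find_optimal_combination; infer_instance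

-- ===== CLAIM (what is proved, stated in full; the proofs are below) =====
def Claim_equal_find_optimal_combination : Prop := ∀ (combination : List (List (List (String × Int)))) (optimal_combinations : List (String × List (List (String × Int)))) (vacancy_count : Int) (vacancy_role : String), Dom_find_optimal_combination combination optimal_combinations vacancy_count vacancy_role → Pre_find_optimal_combination combination optimal_combinations vacancy_count vacancy_role → Spec_find_optimal_combination combination optimal_combinations vacancy_count vacancy_role (find_optimal_combination combination optimal_combinations vacancy_count vacancy_role)

-- ===== LEMMAS AND PROOFS =====

-- A's comparison value for a combination: the sum of 'exp' over its sorted-truncated form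
def pvScore (t : List (List (String × Int))) : Int := (t.map pvExp).sum

-- the loop body of A's port, as a named function (definitionally equal to the inline lambda)
def pvAStep (vacancy_count : Int) (vacancy_role : String)
    (d : PySem.Dict String (List (List (String × Int)))) (curr_comb : List (List (String × Int))) :
    PySem.Dict String (List (List (String × Int))) :=
  match PySem.Dict.get? d vacancy_role with
  | some stored =>
    if pvScore (pvTop vacancy_count curr_comb) > pvScore (pvTop vacancy_count stored)
    then d.insert vacancy_role (pvTop vacancy_count curr_comb) else d
  | none => d.insert vacancy_role (pvTop vacancy_count curr_comb)

-- a best-so-far accumulator (proof device used to characterise A's fold)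
def pvBStep (vacancy_count : Int)
    (acc : Option Int × Option (List (List (String × Int)))) (comb : List (List (String × Int))) :
    Option Int × Option (List (List (String × Int))) :=
  match acc.1 with
  | none => (some (pvScore (pvTop vacancy_count comb)), some (pvTop vacancy_count comb))
  | some b => if pvScore (pvTop vacancy_count comb) > b
              then (some (pvScore (pvTop vacancy_count comb)), some (pvTop vacancy_count comb))
              else acc

theorem pv_find_eq (combination : List (List (List (String × Int)))) (optimal_combinations : List (String × List (List (String × Int)))) (vacancy_count : Int) (vacancy_role : String) :
    find_optimal_combination combination optimal_combinations vacancy_count vacancy_role =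
      (List.foldl (pvAStep vacancy_count vacancy_role) (PySem.Dict.mk optimal_combinations) combination).items := rfl

-- [:vacancy_count]-truncating an already sorted-and-truncated list changes nothing (0 ≤ vacancy_count)
theorem pvTop_idem {vc : Int} (hvc : 0 ≤ vc) (x : List (List (String × Int))) :
    pvTop vc (pvTop vc x) = pvTop vc x := by
  unfold pvTop
  rw [PySem.List.slice_to _ hvc, PySem.List.slice_to _ hvc]
  have hp : ((PySem.List.sorted x pvExp true).take vc.toNat).Pairwise
      (fun a b => pvExp b ≤ pvExp a) :=
    (PySem.List.sorted_pairwise_rev (xs := x) (key := pvExp)).sublist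
      (List.take_sublist _ _)
  rw [PySem.List.sorted_rev_eq_self_of_pairwise _ pvExp hp]
  exact List.take_of_length_le (by simp)

-- mapping the key over a stable reverse-sort by that key = reverse-sorting the mapped values
theorem pv_insertBy_map {α β : Type} (f : α → β) (p : β → β → Bool) (x : α) (ys : List α) :
    (PySem.List.insertBy (fun a b => p (f a) (f b)) x ys).map f
      = PySem.List.insertBy p (f x) (ys.map f) := by
  induction ys with
  | nil => simp [PySem.List.insertBy]
  | cons a t ih => simp [PySem.List.insertBy]; split <;> simp [ih]

theorem pv_sorted_map_comm {α : Type} (f : α → Int) (xs : List α) :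
    PySem.List.sorted (xs.map f) (fun x => x) true = (PySem.List.sorted xs f true).map f := by
  rw [PySem.List.sorted_rev_eq_foldl_insertBy, PySem.List.sorted_rev_eq_foldl_insertBy, List.foldl_map]
  suffices h : ∀ acc : List α,
      List.foldl (fun acc x => PySem.List.insertBy (fun a b => decide (b < a)) (f x) acc) (acc.map f) xs
        = (List.foldl (fun acc x => PySem.List.insertBy (fun a b => decide (f b < f a)) x acc) acc xs).map f by
    simpa using h []
  induction xs with
  | nil => intro acc; simp
  | cons a t ih =>
    intro acc
    simp only [List.foldl_cons]
    rw [← pv_insertBy_map f (fun a b => decide (b < a)) a acc]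
    exact ih _

-- B's value-sort score equals A's comparison value (for a nonnegative count)
theorem pv_score_eq {vc : Int} (hvc : 0 ≤ vc) (comb : List (List (String × Int))) :
    pvValScore vc comb = pvScore (pvTop vc comb) := by
  unfold pvValScore pvScore pvTop
  rw [pv_sorted_map_comm pvExp comb, PySem.List.slice_to _ hvc, PySem.List.slice_to _ hvc,
    ← List.map_take]

-- once the accumulator holds a candidate, it holds one forever
theorem pvBfold_some (vc : Int) (l : List (List (List (String × Int))))
    (x : Option Int) (t : List (List (String × Int))) :
    ∃ u, (List.foldl (pvBStep vc) (x, some t) l).2 = some u := by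
  induction l generalizing x t with
  | nil => exact ⟨t, rfl⟩
  | cons a l ih =>
    simp only [List.foldl_cons]
    rcases x with _ | b
    · exact ih (some (pvScore (pvTop vc a))) (pvTop vc a)
    · simp only [pvBStep]
      by_cases hs : pvScore (pvTop vc a) > b
      · rw [if_pos hs]; exact ih (some (pvScore (pvTop vc a))) (pvTop vc a)
      · rw [if_neg hs]; exact ih (some b) t

-- the accumulator's final best is the last update if there was one, else the starting candidate
theorem pvBfold_snd (vc : Int) (l : List (List (List (String × Int))))
    (x : Option Int) (c : Option (List (List (String × Int)))) :
    List.foldl (pvBStep vc) (x, c) l =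
      ((List.foldl (pvBStep vc) (x, none) l).1,
        match (List.foldl (pvBStep vc) (x, none) l).2 with
        | some u => some u
        | none => c) := by
  induction l generalizing x c with
  | nil => simp
  | cons a l ih =>
    simp only [List.foldl_cons]
    rcases x with _ | b
    · simp only [pvBStep]
      obtain ⟨u, hu⟩ := pvBfold_some vc l (some (pvScore (pvTop vc a))) (pvTop vc a)
      rw [hu]
      exact Prod.ext rfl hu
    · simp only [pvBStep]
      by_cases hs : pvScore (pvTop vc a) > b
      · simp only [if_pos hs]
        obtain ⟨u, hu⟩ := pvBfold_some vc l (some (pvScore (pvTop vc a))) (pvTop vc a)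
        rw [hu]
        exact Prod.ext rfl hu
      · simp only [if_neg hs]
        exact ih (some b) c

-- A's fold equals the accumulator run: the starting dict with the role key overwritten by the
-- accumulator's final best, when there is one
theorem pvMain (vc : Int) (role : String) (hvc : 0 ≤ vc)
    (l : List (List (List (String × Int)))) (d : PySem.Dict String (List (List (String × Int)))) :
    List.foldl (pvAStep vc role) d l =
      (match (List.foldl (pvBStep vc)
          ((PySem.Dict.get? d role).map (fun v => pvScore (pvTop vc v)), none) l).2 with
       | some t => d.insert role t
       | none => d) := by
  induction l generalizing d with
  | nil => simp
  | cons a l ih =>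
    simp only [List.foldl_cons]
    have hins :
        List.foldl (pvAStep vc role) (d.insert role (pvTop vc a)) l =
          (match (List.foldl (pvBStep vc) (some (pvScore (pvTop vc a)), none) l).2 with
           | some u => d.insert role u
           | none => d.insert role (pvTop vc a)) := by
      rw [ih (d.insert role (pvTop vc a))]
      rw [PySem.Dict.get?_insert_self, Option.map_some, pvTop_idem hvc]
      rcases h : (List.foldl (pvBStep vc) (some (pvScore (pvTop vc a)), none) l).2 with _ | u
      · rfl
      · simp only [PySem.Dict.insert_insert_self]
    rcases hd : PySem.Dict.get? d role with _ | v
    · have hA : pvAStep vc role d a = d.insert role (pvTop vc a) := by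
        simp only [pvAStep, hd]
      rw [hA, hins, Option.map_none,
        show pvBStep vc (none, none) a
          = (some (pvScore (pvTop vc a)), some (pvTop vc a)) from rfl,
        pvBfold_snd vc l (some (pvScore (pvTop vc a))) (some (pvTop vc a))]
      rcases h : (List.foldl (pvBStep vc) (some (pvScore (pvTop vc a)), none) l).2 with _ | u <;> rfl
    · have hA : pvAStep vc role d a =
          (if pvScore (pvTop vc a) > pvScore (pvTop vc v)
           then d.insert role (pvTop vc a) else d) := by
        simp only [pvAStep, hd]
      rw [hA, Option.map_some,
        show pvBStep vc (some (pvScore (pvTop vc v)), none) a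
          = (if pvScore (pvTop vc a) > pvScore (pvTop vc v)
             then (some (pvScore (pvTop vc a)), some (pvTop vc a))
             else (some (pvScore (pvTop vc v)), none)) from rfl]
      by_cases hgt : pvScore (pvTop vc a) > pvScore (pvTop vc v)
      · rw [if_pos hgt, if_pos hgt, hins,
          pvBfold_snd vc l (some (pvScore (pvTop vc a))) (some (pvTop vc a))]
        rcases h : (List.foldl (pvBStep vc) (some (pvScore (pvTop vc a)), none) l).2 with _ | u <;> rfl
      · rw [if_neg hgt, if_neg hgt, ih d, hd, Option.map_some]

-- if no combination beats the running bound, the accumulator never moves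
theorem pvBfold_le (vc : Int) (l : List (List (List (String × Int))))
    (b : Int) (c : Option (List (List (String × Int))))
    (h : ∀ a ∈ l, pvScore (pvTop vc a) ≤ b) :
    List.foldl (pvBStep vc) (some b, c) l = (some b, c) := by
  induction l with
  | nil => rfl
  | cons a t ih =>
    simp only [List.foldl_cons, pvBStep]
    rw [if_neg (by exact not_lt.mpr (h a (List.mem_cons_self)))]
    exact ih (fun x hx => h x (List.mem_cons_of_mem _ hx))

-- the accumulator ends at the first combination attaining the maximal score, provided the
-- start bound (if any) is strictly below the maximum
theorem pvBfold_argmax (vc : Int) (m : Int) (l : List (List (List (String × Int))))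
    (x0 : Option Int) (i : Nat)
    (hidx : List.idxOf? m (l.map (fun a => pvScore (pvTop vc a))) = some i)
    (hmax : ∀ a ∈ l, pvScore (pvTop vc a) ≤ m)
    (hx0 : x0 = none ∨ ∃ b, x0 = some b ∧ b < m) :
    List.foldl (pvBStep vc) (x0, none) l =
      (some m, some (pvTop vc ((PySem.List.pyGet? l (i : Int)).getD []))) := by
  induction l generalizing x0 i with
  | nil => simp at hidx
  | cons a t ih =>
    simp only [List.map_cons] at hidx
    by_cases ha : pvScore (pvTop vc a) = m
    · rw [List.idxOf?_cons, if_pos (by simp [ha])] at hidx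
      obtain rfl : i = 0 := by simpa using hidx.symm
      have hget : (PySem.List.pyGet? (a :: t) ((0 : Nat) : Int)).getD [] = a := by
        rw [PySem.List.pyGet?_natCast]; rfl
      rw [hget]
      have hstep : pvBStep vc (x0, none) a = (some m, some (pvTop vc a)) := by
        rcases hx0 with rfl | ⟨b, rfl, hb⟩
        · simp only [pvBStep, ha]
        · simp only [pvBStep]
          rw [if_pos (by rw [ha]; exact hb)]
          rw [ha]
      rw [List.foldl_cons, hstep]
      exact pvBfold_le vc t m (some (pvTop vc a))
        (fun x hx => hmax x (List.mem_cons_of_mem _ hx))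
    · rw [List.idxOf?_cons, if_neg (by simp [ha])] at hidx
      rcases Option.map_eq_some_iff.mp hidx with ⟨j, hj, rfl⟩
      have hget : (PySem.List.pyGet? (a :: t) ((j + 1 : Nat) : Int)).getD []
          = (PySem.List.pyGet? t ((j : Nat) : Int)).getD [] := by
        rw [PySem.List.pyGet?_natCast, PySem.List.pyGet?_natCast, List.getElem?_cons_succ]
      have hmax' : ∀ x ∈ t, pvScore (pvTop vc x) ≤ m :=
        fun x hx => hmax x (List.mem_cons_of_mem _ hx)
      have halt : pvScore (pvTop vc a) < m :=
        lt_of_le_of_ne (hmax a (List.mem_cons_self)) ha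
      rw [hget, List.foldl_cons]
      rcases hx0 with rfl | ⟨b, rfl, hb⟩
      · have hstep : pvBStep vc (none, none) a
            = (some (pvScore (pvTop vc a)), some (pvTop vc a)) := rfl
        rw [hstep, pvBfold_snd vc t (some (pvScore (pvTop vc a))) (some (pvTop vc a)),
          ih (some (pvScore (pvTop vc a))) j hj hmax' (Or.inr ⟨_, rfl, halt⟩)]
      · simp only [pvBStep]
        by_cases hs : pvScore (pvTop vc a) > b
        · rw [if_pos hs, pvBfold_snd vc t (some (pvScore (pvTop vc a))) (some (pvTop vc a)),
            ih (some (pvScore (pvTop vc a))) j hj hmax' (Or.inr ⟨_, rfl, halt⟩)]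
        · rw [if_neg hs]
          exact ih (some b) j hj hmax' (Or.inr ⟨b, rfl, hb⟩)

-- max? of a nonempty list is some
theorem pv_max?_cons_some {α : Type} (x : α) (xs : List α) (key : α → Int) :
    ∃ m, PySem.List.max? (x :: xs) key = some m := by
  suffices h : ∀ (l : List α) (y : α), ∃ m,
      List.foldl (fun acc z =>
        match acc with
        | none => some z
        | some w => if key w < key z then some z else some w) (some y) l = some m by
    exact h xs x
  intro l
  induction l with
  | nil => exact fun y => ⟨y, rfl⟩
  | cons z l ih =>
    intro y
    simp only [List.foldl_cons]
    by_cases hz : key y < key z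
    · rw [if_pos hz]; exact ih z
    · rw [if_neg hz]; exact ih y

-- ===== VERDICT (by name: the statement is the Claim_ definition above) =====
theorem find_optimal_combination_spec : Claim_equal_find_optimal_combination := by
  intro combination optimal_combinations vacancy_count vacancy_role _ hpre
  unfold Spec_find_optimal_combination
  rcases hpre with rfl | ⟨hvc, -, -⟩
  · rfl
  have hfun : pvValScore vacancy_count = fun c => pvScore (pvTop vacancy_count c) :=
    funext (pv_score_eq hvc)
  rw [pv_find_eq, pvMain vacancy_count vacancy_role hvc]
  rcases combination with _ | ⟨a, t⟩
  · rfl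
  simp only [find_optimal_combination_alt, hfun, List.map_cons]
  obtain ⟨m, hm⟩ := pv_max?_cons_some (pvScore (pvTop vacancy_count a))
    (t.map (fun c => pvScore (pvTop vacancy_count c))) (fun x => x)
  have hmem : m ∈ pvScore (pvTop vacancy_count a) :: t.map (fun c => pvScore (pvTop vacancy_count c)) :=
    PySem.List.max?_mem hm
  have hmaxs : ∀ x ∈ (a :: t), pvScore (pvTop vacancy_count x) ≤ m := by
    intro x hx
    rcases List.mem_cons.mp hx with rfl | hx
    · exact PySem.List.max?_isMax hm _ List.mem_cons_self
    · exact PySem.List.max?_isMax hm _ (List.mem_cons_of_mem _ (List.mem_map_of_mem hx))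
  obtain ⟨i, hi⟩ := Option.isSome_iff_exists.mp (List.isSome_idxOf?.mpr hmem)
  have hidx : List.idxOf? m ((a :: t).map (fun c => pvScore (pvTop vacancy_count c))) = some i := by
    simpa using hi
  rw [hm]
  simp only [PySem.List.index?, hi, Option.getD_some]
  rcases hd : PySem.Dict.get? (PySem.Dict.mk optimal_combinations) vacancy_role with _ | v
  · simp only [Option.map_none]
    rw [pvBfold_argmax vacancy_count m (a :: t) none i hidx hmaxs (Or.inl rfl)]
  · simp only [Option.map_some]
    by_cases hge : pvScore (pvTop vacancy_count v) ≥ m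
    · rw [if_pos hge,
        pvBfold_le vacancy_count (a :: t) (pvScore (pvTop vacancy_count v)) none
          (fun x hx => le_trans (hmaxs x hx) hge)]
    · rw [if_neg hge,
        pvBfold_argmax vacancy_count m (a :: t) (some (pvScore (pvTop vacancy_count v))) i hidx hmaxs
          (Or.inr ⟨_, rfl, not_le.mp hge⟩)]
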